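-- pv_equiv track=rewrite | github.com/heidekrauttt/projektseminar_dh_semester-2 | evaluation_tool.py | check_string_occurrences
-- ===== SOURCE A (Python) =====
-- def check_string_occurrences(drama_strings):
--     '''
--     check_string_occurrences
--     Helper method for occurrences(): Checks if same speaker occurs twice directly after one another
--     :param: drama_strings: list of one drama separated into sentence strings
--     :return: True if double occurrence, else false
--              numeric value of number of speakers
--     Author: Charlotte
--     '''
--     uppercase_strings = []
--     for sentence in drama_strings:
--         for word in sentence.split(" "):
--             if word.isupper() and word.endswith(":"):
--                 uppercase_strings.append(word)
--
--     unique_uppercase_strings = set(uppercase_strings)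
--     # check if same speaker occurs twice directly after one another
--     previous_string = None
--     for current_string in uppercase_strings:
--         if current_string == previous_string:
--             return True, len(unique_uppercase_strings)
--         previous_string = current_string
--     return False, len(unique_uppercase_strings)
-- ===== SOURCE B (Python) =====
-- def check_string_occurrences(drama_strings):
--     # Single fused pass: track previous speaker, a seen-set and a dup flag; no intermediate list.
--     found_dup = False
--     previous = None
--     seen = set()
--     for sentence in drama_strings:
--         for word in sentence.split(" "):
--             if word.isupper() and word.endswith(":"):
--                 if word == previous:
--                     found_dup = True
--                 seen.add(word)
--                 previous = word
--     return found_dup, len(seen)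
-- ===== Notes on version B (the rewrite author's own statement) =====
-- stated objective: simpler
-- what changed: B fuses A's two passes (build a list of speaker tags, then scan it for an adjacent duplicate) into one loop over the words that maintains the previous speaker, a seen-set and a duplicate flag, dropping the intermediate list.
import Mathlib
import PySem

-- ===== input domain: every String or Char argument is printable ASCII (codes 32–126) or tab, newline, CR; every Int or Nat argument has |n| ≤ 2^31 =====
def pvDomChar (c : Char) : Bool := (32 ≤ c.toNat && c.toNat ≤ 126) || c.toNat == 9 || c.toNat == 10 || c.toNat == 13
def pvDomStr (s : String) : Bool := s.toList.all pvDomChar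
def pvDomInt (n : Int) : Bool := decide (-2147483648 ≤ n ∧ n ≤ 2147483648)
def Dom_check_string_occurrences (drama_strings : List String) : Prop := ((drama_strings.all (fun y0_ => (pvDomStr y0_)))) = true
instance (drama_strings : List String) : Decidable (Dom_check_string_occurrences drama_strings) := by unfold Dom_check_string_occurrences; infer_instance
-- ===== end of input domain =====

-- B fuses A's two passes (collect speaker tags, then rescan for an adjacent duplicate) into one
-- loop over the words maintaining previous speaker, a seen-set and a dup flag (objective: simpler).


-- shared port of the Python builtins both programs call:
-- str.isupper(): at least one cased character and no lowercase one — exact on the ASCII domain,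
-- where the cased characters are exactly the alphabetic ones
def pyIsupper (s : String) : Bool :=
  s.toList.any PySem.Chars.isalpha && s.toList.all (fun c => !PySem.Chars.islower c)

-- sentence.split(" ") (sep is nonempty, so split? is always some)
def pyWords (s : String) : List String := (PySem.Str.split? s " ").getD []

-- ===== PORT A =====
-- the early-returning scan over uppercase_strings (len(unique) is fixed before the loop)
def aLoop (n : Int) (prev : Option String) : List String → Bool × Int
  | [] => (false, n)
  | c :: rest => if prev == some c then (true, n) else aLoop n (some c) rest

def check_string_occurrences (drama_strings : List String) : Bool × Int :=
  let uppercase_strings := drama_strings.foldl (fun acc sentence =>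
    (pyWords sentence).foldl (fun acc word =>
      if pyIsupper word && PySem.Str.endswith word ":" then acc ++ [word] else acc) acc) []
  let unique_uppercase_strings := PySem.Set.ofList uppercase_strings
  aLoop (PySem.Set.len unique_uppercase_strings) none uppercase_strings

-- ===== PORT B =====
-- state (found_dup, previous, seen); the body of B's guarded update
def bUpd (st : Bool × Option String × PySem.Set String) (word : String) :
    Bool × Option String × PySem.Set String :=
  ((if st.2.1 == some word then true else st.1), some word, PySem.Set.add st.2.2 word)

def bStep (st : Bool × Option String × PySem.Set String) (word : String) :
    Bool × Option String × PySem.Set String :=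
  if pyIsupper word && PySem.Str.endswith word ":" then bUpd st word else st

def check_string_occurrences_alt (drama_strings : List String) : Bool × Int :=
  let st := drama_strings.foldl (fun st sentence => (pyWords sentence).foldl bStep st)
    (false, none, PySem.Set.empty)
  (st.1, PySem.Set.len st.2.2)

-- ===== PRECONDITION & SPEC =====
def Spec_check_string_occurrences (drama_strings : List String) (out : Bool × Int) : Prop := out = check_string_occurrences_alt drama_strings
instance (drama_strings : List String) (out : Bool × Int) : Decidable (Spec_check_string_occurrences drama_strings out) := by unfold Spec_check_string_occurrences; infer_instance

-- ===== CLAIM (what is proved, stated in full; the proofs are below) =====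
def Claim_equal_check_string_occurrences : Prop := ∀ (drama_strings : List String), Dom_check_string_occurrences drama_strings → Spec_check_string_occurrences drama_strings (check_string_occurrences drama_strings)

-- ===== LEMMAS AND PROOFS =====

-- the filtered word stream both programs effectively traverse
def pvTags (drama_strings : List String) : List String :=
  drama_strings.flatMap (fun s =>
    (pyWords s).filter (fun word => pyIsupper word && PySem.Str.endswith word ":"))

theorem aList_eq_gen :
    ∀ (drama_strings : List String) (acc : List String),
      drama_strings.foldl (fun acc sentence =>
        (pyWords sentence).foldl (fun acc word =>
          if pyIsupper word && PySem.Str.endswith word ":" then acc ++ [word] else acc) acc) acc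
      = acc ++ pvTags drama_strings := by
  intro ds
  induction ds with
  | nil => intro acc; simp [pvTags]
  | cons s rest ih =>
    intro acc
    have h := PySem.List.foldl_append_if
      (fun word => pyIsupper word && PySem.Str.endswith word ":") id (pyWords s) acc
    simp only [List.map_id, id_eq] at h
    simp only [List.foldl_cons]
    rw [h, ih]
    simp only [pvTags, List.flatMap_cons, List.append_assoc]

theorem foldl_nested {α β σ : Type} (g : α → List β) (f : σ → β → σ) :
    ∀ (l : List α) (st : σ),
      l.foldl (fun st a => (g a).foldl f st) st = (l.flatMap g).foldl f st := by
  intro l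
  induction l with
  | nil => intro st; rfl
  | cons a rest ih => intro st; simp [List.foldl_append, ih]

theorem bFold_fst (n : Int) :
    ∀ (L : List String) (f : Bool) (p : Option String) (s : PySem.Set String),
      (L.foldl bUpd (f, p, s)).1 = (f || (aLoop n p L).1) := by
  intro L
  induction L with
  | nil => intro f p s; simp [aLoop]
  | cons c rest ih =>
    intro f p s
    by_cases hc : (p == some c) = true <;>
      simp [List.foldl_cons, bUpd, aLoop, hc, ih]

theorem bFold_seen :
    ∀ (L : List String) (f : Bool) (p : Option String) (s : PySem.Set String),
      (L.foldl bUpd (f, p, s)).2.2 = PySem.Set.update s L := by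
  intro L
  induction L with
  | nil => intro f p s; simp [PySem.Set.update]
  | cons c rest ih =>
    intro f p s
    simp [List.foldl_cons, bUpd, PySem.Set.update, ih]

theorem aLoop_snd (n : Int) :
    ∀ (p : Option String) (L : List String), (aLoop n p L).2 = n := by
  intro p L
  induction L generalizing p with
  | nil => rfl
  | cons c rest ih =>
    by_cases hc : (p == some c) = true <;> simp [aLoop, hc, ih]

-- ===== VERDICT (by name: the statement is the Claim_ definition above) =====
theorem check_string_occurrences_spec : Claim_equal_check_string_occurrences := by
  intro ds _
  unfold Spec_check_string_occurrences check_string_occurrences check_string_occurrences_alt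
  rw [aList_eq_gen ds [], List.nil_append]
  rw [foldl_nested pyWords bStep ds (false, none, PySem.Set.empty)]
  have hfilter : (ds.flatMap pyWords).foldl bStep (false, none, PySem.Set.empty)
      = (pvTags ds).foldl bUpd (false, none, PySem.Set.empty) := by
    have := List.foldl_filter
      (p := fun word => pyIsupper word && PySem.Str.endswith word ":")
      (f := bUpd) (l := ds.flatMap pyWords)
      (init := ((false, none, PySem.Set.empty) : Bool × Option String × PySem.Set String))
    simp only [pvTags, List.filter_flatMap] at *
    rw [this]; rfl
  rw [hfilter]
  have h1 := bFold_fst (PySem.Set.len (PySem.Set.ofList (pvTags ds))) (pvTags ds)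
    false none PySem.Set.empty
  have h2 : PySem.Set.len ((List.foldl bUpd (false, none, PySem.Set.empty) (pvTags ds)).2.2)
      = PySem.Set.len (PySem.Set.ofList (pvTags ds)) := by
    rw [bFold_seen (pvTags ds) false none PySem.Set.empty]
    rfl
  have h3 : aLoop (PySem.Set.len (PySem.Set.ofList (pvTags ds))) none (pvTags ds)
      = ((aLoop (PySem.Set.len (PySem.Set.ofList (pvTags ds))) none (pvTags ds)).1,
         PySem.Set.len (PySem.Set.ofList (pvTags ds))) :=
    Prod.ext rfl (aLoop_snd (PySem.Set.len (PySem.Set.ofList (pvTags ds))) none (pvTags ds))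
  rw [h3]
  exact Prod.ext ((h1.trans (Bool.false_or _)).symm) h2.symm
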